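-- pv_equiv track=rewrite | github.com/Pyrokine/zhihu_encrypt | zhihu.py | Func_k
-- ===== SOURCE A (Python) =====
-- def Func_k(data):
--     n = []
--     t = 66
--     for r in range(len(data)):
--         o = 24 ^ data[r] ^ t
--         n.append(chr(o))
--         t = o
--     return "".join(n)
-- ===== SOURCE B (Python) =====
-- def Func_k(data):
--     # Two-pass: running XOR of the input bytes, then a 66/24-parity mask per index.
--     prefix = []
--     acc = 0
--     for d in data:
--         acc ^= d
--         prefix.append(acc)
--     return "".join(chr(p ^ 66 ^ (24 if i % 2 == 0 else 0)) for i, p in enumerate(prefix))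
-- ===== Notes on version B (the rewrite author's own statement) =====
-- stated objective: alternative
-- what changed: B replaces A's output-feedback chain (each chr depends on the previous output byte) with a prefix-XOR pass over the inputs followed by a per-index 66/24 parity mask, using the identity out[r] = (data[0]^...^data[r]) ^ 66 ^ (24 if r even else 0).
-- outside the precondition, e.g. on Func_k([-1]): A raises ValueError, B raises ValueError
import Mathlib
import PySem

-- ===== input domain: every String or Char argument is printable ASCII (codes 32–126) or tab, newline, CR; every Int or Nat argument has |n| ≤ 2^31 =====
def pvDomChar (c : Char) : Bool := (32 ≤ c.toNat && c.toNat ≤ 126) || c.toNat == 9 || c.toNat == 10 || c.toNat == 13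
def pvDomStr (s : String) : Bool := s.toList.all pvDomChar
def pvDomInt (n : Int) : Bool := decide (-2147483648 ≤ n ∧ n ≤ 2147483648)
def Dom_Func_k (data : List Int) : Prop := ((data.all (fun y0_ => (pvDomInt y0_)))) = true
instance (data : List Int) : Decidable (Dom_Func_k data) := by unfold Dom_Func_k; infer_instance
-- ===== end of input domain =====

-- B replaces A's output-feedback XOR chain by a prefix-XOR of the inputs plus a 66/24 index-parity mask; same cost, different decomposition. Equivalence proved on inputs admitted by Pre_.


-- ===== PORT A =====
-- chr(o) is ported as Char.ofNat o.toNat: exact on Pre_ (Pre_ says every running value o is a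
-- valid non-surrogate Unicode scalar, exactly where chr returns a Lean-representable character).
def Func_k (data : List Int) : String :=
  -- n = []; t = 66; for r in range(len(data)): o = 24 ^ data[r] ^ t; n.append(chr(o)); t = o
  String.mk
    ((PySem.List.pyRange 0 (PySem.List.len data)).foldl
      (fun (st : List Char × Int) r =>
        (st.1 ++ [Char.ofNat (PySem.Int.bxor (PySem.Int.bxor 24 (PySem.List.pyGetD data r 0)) st.2).toNat],
          PySem.Int.bxor (PySem.Int.bxor 24 (PySem.List.pyGetD data r 0)) st.2))
      ([], 66)).1

-- ===== PORT B =====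
-- prefix = []; acc = 0; for d in data: acc ^= d; prefix.append(acc)
def pvPrefixXor (acc : Int) : List Int → List Int
  | [] => []
  | d :: ds => (PySem.Int.bxor acc d) :: pvPrefixXor (PySem.Int.bxor acc d) ds

-- "".join(chr(p ^ 66 ^ (24 if i % 2 == 0 else 0)) for i, p in enumerate(prefix))
def Func_k_alt (data : List Int) : String :=
  String.mk ((PySem.List.enumerate (pvPrefixXor 0 data) 0).map
    (fun ip => Char.ofNat ((PySem.Int.bxor (PySem.Int.bxor ip.2 66) (if ip.1 % 2 = 0 then 24 else 0)).toNat)))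

-- ===== PRECONDITION & SPEC =====
-- The r-th character A emits, as a function of the input alone: XOR of data[0..r], masked by 66
-- and by 24 on even indices (a mathematical characterisation, not either port's loop).
def pvRun (data : List Int) (r : Nat) : Int :=
  PySem.Int.bxor (PySem.Int.bxor ((data.take (r + 1)).foldl PySem.Int.bxor 0) 66)
    (if r % 2 = 0 then 24 else 0)

-- Pre_ admits exactly the inputs on which A returns a Lean-representable string: it excludes only
-- inputs where some emitted code point is negative or > 0x10FFFF (Python's chr raises ValueError
-- there, and so does B) and inputs where some emitted code point is a lone UTF-16 surrogate
-- (0xD800..0xDFFF), where Python returns a string that Lean's String type cannot represent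
-- (B returns that same string in Python).
def Pre_Func_k (data : List Int) : Prop :=
  ∀ r < data.length, 0 ≤ pvRun data r ∧ pvRun data r ≤ 1114111 ∧
    ¬ (55296 ≤ pvRun data r ∧ pvRun data r ≤ 57343)
instance (data : List Int) : Decidable (Pre_Func_k data) := by unfold Pre_Func_k; infer_instance
def pvWitness_Func_k : List Int := [72, 101, 108, 108, 111]

def Spec_Func_k (data : List Int) (out : String) : Prop := out = Func_k_alt data
instance (data : List Int) (out : String) : Decidable (Spec_Func_k data out) := by unfold Spec_Func_k; infer_instance

-- ===== CLAIM (what is proved, stated in full; the proofs are below) =====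
def Claim_equal_Func_k : Prop := ∀ (data : List Int), Dom_Func_k data → Pre_Func_k data → Spec_Func_k data (Func_k data)

-- ===== LEMMAS AND PROOFS =====

theorem pv_bxor_assoc (a b c : Int) :
    PySem.Int.bxor (PySem.Int.bxor a b) c = PySem.Int.bxor a (PySem.Int.bxor b c) := by
  have hneg : ∀ n : Nat, (-(-(n:Int) - 1) - 1).toNat = n := by intro n; omega
  have hnn : ∀ n : Nat, (0:Int) ≤ (n:Int) := by intro n; positivity
  have hng : ∀ n : Nat, ¬ (0:Int) ≤ -(n:Int) - 1 := by intro n; omega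
  unfold PySem.Int.bxor
  by_cases ha : 0 ≤ a <;> by_cases hb : 0 ≤ b <;> by_cases hc : 0 ≤ c <;>
    simp only [ha, hb, hc, if_true, if_false, ite_true, ite_false, hnn, hng] <;>
    simp [hneg, hnn, hng, Int.toNat_natCast, Nat.xor_assoc]

theorem pv_bxor_left_comm (a b c : Int) :
    PySem.Int.bxor a (PySem.Int.bxor b c) = PySem.Int.bxor b (PySem.Int.bxor a c) := by
  rw [← pv_bxor_assoc, PySem.Int.bxor_comm a b, pv_bxor_assoc]

theorem pv_zero_bxor (a : Int) : PySem.Int.bxor 0 a = a := by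
  rw [PySem.Int.bxor_comm, PySem.Int.bxor_zero]

theorem pv_bxor_cancel (a b : Int) : PySem.Int.bxor a (PySem.Int.bxor a b) = b := by
  rw [← pv_bxor_assoc, PySem.Int.bxor_self, PySem.Int.bxor_comm, PySem.Int.bxor_zero]

-- A's loop body, as structural recursion on the data (the chars A appends from running XOR t).
def pvAChain (t : Int) : List Int → List Char
  | [] => []
  | d :: ds =>
    Char.ofNat (PySem.Int.bxor (PySem.Int.bxor 24 d) t).toNat ::
      pvAChain (PySem.Int.bxor (PySem.Int.bxor 24 d) t) ds

theorem pvA_foldl (data : List Int) (cs : List Char) (t : Int) :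
    (data.foldl
        (fun (st : List Char × Int) d =>
          (st.1 ++ [Char.ofNat (PySem.Int.bxor (PySem.Int.bxor 24 d) st.2).toNat],
            PySem.Int.bxor (PySem.Int.bxor 24 d) st.2))
        (cs, t)).1 = cs ++ pvAChain t data := by
  induction data generalizing cs t with
  | nil => simp [pvAChain]
  | cons d ds ih =>
    simp only [List.foldl_cons]
    rw [ih]
    simp [pvAChain]

-- Main invariant: enumerating the prefix XORs from index i with running XOR c produces
-- A's chain started from t = c ^ 66 ^ (0 if i is even else 24).
theorem pv_main (data : List Int) (c : Int) (i : Int) :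
    (PySem.List.enumerate (pvPrefixXor c data) i).map
        (fun ip => Char.ofNat ((PySem.Int.bxor (PySem.Int.bxor ip.2 66) (if ip.1 % 2 = 0 then 24 else 0)).toNat))
      = pvAChain (PySem.Int.bxor (PySem.Int.bxor c 66) (if i % 2 = 0 then 0 else 24)) data := by
  induction data generalizing c i with
  | nil => simp [pvPrefixXor, pvAChain]
  | cons d ds ih =>
    simp only [pvPrefixXor, PySem.List.enumerate_cons, List.map_cons, pvAChain, List.cons.injEq]
    refine ⟨?_, ?_⟩
    · apply congrArg (fun z : Int => Char.ofNat z.toNat)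
      by_cases h : i % 2 = 0 <;>
        simp only [if_pos, h, ite_false] <;>
        simp [pv_bxor_left_comm, PySem.Int.bxor_comm, pv_bxor_cancel, pv_zero_bxor]
    · rw [ih]
      apply congrArg (fun t => pvAChain t ds)
      by_cases h : i % 2 = 0
      · rw [if_pos h, if_neg (by omega : ¬ (i + 1) % 2 = 0)]
        simp [pv_bxor_assoc, pv_bxor_left_comm, PySem.Int.bxor_comm, pv_bxor_cancel,
          PySem.Int.bxor_zero, pv_zero_bxor, PySem.Int.bxor_self]
      · rw [if_neg h, if_pos (by omega : (i + 1) % 2 = 0)]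
        simp [pv_bxor_assoc, pv_bxor_left_comm, PySem.Int.bxor_comm, pv_bxor_cancel,
          PySem.Int.bxor_zero, pv_zero_bxor, PySem.Int.bxor_self]

-- ===== VERDICT (by name: the statement is the Claim_ definition above) =====
theorem Func_k_spec : Claim_equal_Func_k := by
  intro data _ _
  unfold Spec_Func_k Func_k Func_k_alt
  rw [PySem.List.foldl_pyRange_zero_pyGetD data 0
        (fun (st : List Char × Int) v =>
          (st.1 ++ [Char.ofNat (PySem.Int.bxor (PySem.Int.bxor 24 v) st.2).toNat],
            PySem.Int.bxor (PySem.Int.bxor 24 v) st.2))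
        (([] : List Char), (66 : Int))]
  rw [pvA_foldl data [] 66, pv_main data 0 0]
  simp [pv_zero_bxor]
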